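-- pv_equiv track=rewrite | github.com/quarterback/hybrid-baseball | o27v2/playoffs.py | _round_one_pairings
-- ===== SOURCE A (Python) =====
-- import math
--
-- def _round_count(field_size: int) -> int:
--     """Total rounds needed to whittle field_size down to a single
--     champion. ceil(log2) — e.g. 4 → 2, 8 → 3, 9 → 4 (one bye round)."""
--     if field_size <= 1:
--         return 0
--     return math.ceil(math.log2(field_size))
--
-- def _round_one_pairings(seeded_field: list[dict]) -> list[tuple[dict | None, dict]]:
--     """Return round-one pairings as a list of (high, low) tuples.
--
--     Top seeds get byes when field isn't a power of 2. With N teams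
--     and the next power of 2 being P, there are (P - N) bye slots
--     awarded to seeds 1..(P - N); the remaining 2*(N - (P - N)) =
--     2N - P teams pair up high-vs-low among seeds (P - N + 1)..N.
--
--     A bye is encoded as (None, top_seed): the high slot is unused
--     (the team is just "advancing"), and we don't sim any game.
--     """
--     n = len(seeded_field)
--     if n <= 1:
--         return []
--     p = 2 ** _round_count(n)        # next power of 2 ≥ n
--     n_byes = p - n                  # how many teams skip round 1
--     pairings: list[tuple[dict | None, dict]] = []
--
--     # Top n_byes seeds advance automatically.
--     for i in range(n_byes):
--         pairings.append((None, seeded_field[i]))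
--
--     # Remaining teams pair seed (n_byes + i) vs seed (n - 1 - i).
--     playing = seeded_field[n_byes:]
--     half = len(playing) // 2
--     for i in range(half):
--         high = playing[i]
--         low  = playing[len(playing) - 1 - i]
--         pairings.append((low, high))   # (low, high) so high_seed is index 1
--
--     return pairings
-- ===== SOURCE B (Python) =====
-- import math
--
-- def _round_count(field_size: int) -> int:
--     if field_size <= 1:
--         return 0
--     return math.ceil(math.log2(field_size))
--
-- def _round_one_pairings(seeded_field):
--     # Pad the field with None entries up to the full power-of-2 bracket,
--     # fold the bracket in half, and zip each top-half seed with its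
--     # reflected bottom-half opponent; a None opponent means a bye.
--     p = 2 ** _round_count(len(seeded_field))
--     padded = list(seeded_field) + [None] * (p - len(seeded_field))
--     top, bottom = padded[:p // 2], padded[p // 2:]
--     return [(opp, seed) for seed, opp in zip(top, reversed(bottom))]
-- ===== Notes on version B (the rewrite author's own statement) =====
-- stated objective: alternative
-- what changed: Instead of counting byes and running two staged loops (bye loop, then slicing off the playing tail and pairing it end-to-end), B pads the field with None entries up to the full power-of-2 bracket, splits the bracket in half, and zips the top half with the reversed bottom half, a None opponent being a bye; no bye count, no conditional, no index arithmetic.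
import Mathlib
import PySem

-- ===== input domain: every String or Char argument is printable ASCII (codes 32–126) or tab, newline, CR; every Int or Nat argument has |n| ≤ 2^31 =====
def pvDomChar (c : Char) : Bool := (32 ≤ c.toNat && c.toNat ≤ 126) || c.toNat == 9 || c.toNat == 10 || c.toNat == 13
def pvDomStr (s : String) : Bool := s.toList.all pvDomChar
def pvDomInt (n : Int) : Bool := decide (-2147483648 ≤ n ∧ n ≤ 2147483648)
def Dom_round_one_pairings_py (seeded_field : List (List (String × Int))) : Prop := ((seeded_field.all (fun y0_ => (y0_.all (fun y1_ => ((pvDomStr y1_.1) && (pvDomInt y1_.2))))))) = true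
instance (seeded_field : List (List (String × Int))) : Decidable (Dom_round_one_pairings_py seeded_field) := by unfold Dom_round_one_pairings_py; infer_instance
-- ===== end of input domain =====

-- B builds the pairings by a different construction: it pads the field with None
-- entries up to the full power-of-2 bracket, splits the bracket in half and zips the
-- top half with the reversed bottom half (a None opponent is a bye) — no bye count,
-- no conditional loop, no index arithmetic.  Same output, same O(n) cost.
-- _round_count's math.ceil(math.log2 n) is ported as Nat.clog 2 n, the exact ceil(log2 n).

-- ===== PORT A =====
def round_count_py (field_size : Int) : Int :=
  if field_size ≤ 1 then 0 else Nat.clog 2 field_size.toNat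

def round_one_pairings_py (seeded_field : List (List (String × Int))) : List ((Option (List (String × Int))) × (List (String × Int))) :=
  let n : Int := seeded_field.length
  if n ≤ 1 then []
  else
    let p : Int := 2 ^ (round_count_py n).toNat
    let n_byes : Int := p - n
    let pairings : List ((Option (List (String × Int))) × (List (String × Int))) :=
      (PySem.List.pyRange 0 n_byes 1).foldl
        (fun acc i => acc ++ [(none, PySem.List.pyGetD seeded_field i [])]) []
    let playing := PySem.List.slice seeded_field (some n_byes) none
    let half : Int := PySem.Int.floordiv playing.length 2
    (PySem.List.pyRange 0 half 1).foldl
      (fun acc i =>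
        acc ++ [(some (PySem.List.pyGetD playing ((playing.length : Int) - 1 - i) []),
                 PySem.List.pyGetD playing i [])]) pairings

-- ===== PORT B =====
-- Python's padded list holds dict-or-None entries, ported as Option; the final
-- '.getD []' only extracts the seed from the top half, whose entries are always 'some'
-- (Python's comprehension uses the seed as-is), so the default is never produced.
def round_one_pairings_py_alt (seeded_field : List (List (String × Int))) : List ((Option (List (String × Int))) × (List (String × Int))) :=
  let p : Int := 2 ^ (round_count_py seeded_field.length).toNat
  let padded : List (Option (List (String × Int))) :=
    seeded_field.map some ++ List.replicate (p - seeded_field.length).toNat none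
  let top := PySem.List.slice padded none (some (PySem.Int.floordiv p 2))
  let bottom := PySem.List.slice padded (some (PySem.Int.floordiv p 2)) none
  (top.zip bottom.reverse).map (fun so => (so.2, so.1.getD []))

-- ===== PRECONDITION & SPEC =====
def Spec_round_one_pairings_py (seeded_field : List (List (String × Int))) (out : List ((Option (List (String × Int))) × (List (String × Int)))) : Prop := out = round_one_pairings_py_alt seeded_field
instance (seeded_field : List (List (String × Int))) (out : List ((Option (List (String × Int))) × (List (String × Int)))) : Decidable (Spec_round_one_pairings_py seeded_field out) := by unfold Spec_round_one_pairings_py; infer_instance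

-- ===== CLAIM (what is proved, stated in full; the proofs are below) =====
def Claim_equal_round_one_pairings_py : Prop := ∀ (seeded_field : List (List (String × Int))), Dom_round_one_pairings_py seeded_field → Spec_round_one_pairings_py seeded_field (round_one_pairings_py seeded_field)

-- ===== LEMMAS AND PROOFS =====

-- Common normal form both ports are reduced to: slot i of the half-bracket holds
-- (mirror opponent or none, seed i).
def pvSpine (sf : List (List (String × Int))) (P : Nat) : List ((Option (List (String × Int))) × (List (String × Int))) :=
  (List.range (P / 2)).map (fun i =>
    (if P - 1 - i < sf.length then some (sf.getD (P - 1 - i) []) else none, sf.getD i []))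

def pvP (n : Int) : Nat := 2 ^ (round_count_py n).toNat

theorem getD_drop_eq {α : Type} (xs : List α) (b k : Nat) (d : α) (h : b + k < xs.length) :
    (xs.drop b).getD k d = xs.getD (b + k) d := by
  rw [List.getD_eq_getElem _ _ (by simp; omega), List.getD_eq_getElem _ _ h, List.getElem_drop]

theorem pv_bracket (N : Nat) (h2 : 2 ≤ N) :
    N ≤ pvP N ∧ pvP N < 2 * N ∧ pvP N % 2 = 0 := by
  have hh : ¬ ((N : Int) ≤ 1) := by omega
  have hrc : pvP (N : Int) = 2 ^ Nat.clog 2 N := by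
    simp [pvP, round_count_py, hh]
  set C := Nat.clog 2 N with hC
  have hCpos : 0 < C := Nat.clog_pos (by norm_num) (by omega)
  have hNP : N ≤ 2 ^ C := Nat.le_pow_clog (by norm_num) N
  have hhalf : 2 ^ C = 2 * 2 ^ (C - 1) := by
    rw [← pow_succ']; congr 1; omega
  have hlt : 2 ^ (C - 1) < N := by
    have := Nat.pow_pred_clog_lt_self (b := 2) (by norm_num) (x := N) (by omega)
    simpa [Nat.pred_eq_sub_one, hC] using this
  refine ⟨by omega, by omega, by omega⟩

theorem A_eq_spine (sf : List (List (String × Int))) :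
    round_one_pairings_py sf = pvSpine sf (pvP sf.length) := by
  by_cases h : (sf.length : Int) ≤ 1
  · have : pvP sf.length = 1 := by simp [pvP, round_count_py, h]
    simp [round_one_pairings_py, h, pvSpine, this]
  · simp only [round_one_pairings_py]
    rw [if_neg h]
    set N := sf.length with hNdef
    have hN2 : 2 ≤ N := by omega
    obtain ⟨hNP, hP2N, hPeven⟩ := pv_bracket N hN2
    set P := pvP (N : Int) with hPdef
    have hpow : (2 : Int) ^ ((round_count_py (N : Int)).toNat) = ((P : Nat) : Int) := by
      simp [hPdef, pvP]
    rw [hpow]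
    set b := P - N with hbdef
    have hbI : ((P : Nat) : Int) - ((N : Nat) : Int) = ((b : Nat) : Int) := by omega
    rw [hbI, PySem.List.slice_from_natCast, List.length_drop, ← hNdef]
    have hfd2 : PySem.Int.floordiv ((N - b : Nat) : Int) 2 = (((N - b) / 2 : Nat) : Int) := by
      exact_mod_cast PySem.Int.floordiv_natCast (N - b) 2
    rw [hfd2, PySem.List.pyRange_zero_natCast, PySem.List.pyRange_zero_natCast]
    simp only [List.foldl_map, PySem.List.foldl_append_singleton_eq_map,
      PySem.List.pyGetD_natCast, List.nil_append]
    have hsplit : P / 2 = b + (N - b) / 2 := by omega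
    rw [pvSpine, ← hNdef, hsplit, List.range_add, List.map_append, List.map_map]
    congr 1
    · apply List.map_congr_left
      intro k hk
      rw [List.mem_range] at hk
      rw [if_neg (show ¬ (P - 1 - k < N) by omega)]
    · apply List.map_congr_left
      intro k hk
      rw [List.mem_range] at hk
      simp only [Function.comp]
      rw [if_pos (show P - 1 - (b + k) < N by omega)]
      rw [show ((N - b : Nat) : Int) - 1 - ((k : Nat) : Int) = ((N - b - 1 - k : Nat) : Int) from by
            omega,
          PySem.List.pyGetD_natCast,
          getD_drop_eq sf b (N - b - 1 - k) [] (by omega), getD_drop_eq sf b k [] (by omega),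
          show b + (N - b - 1 - k) = P - 1 - (b + k) from by omega]

theorem padded_getElem (sf : List (List (String × Int))) (m j : Nat)
    (hj : j < (sf.map some ++ List.replicate m (none : Option (List (String × Int)))).length) :
    (sf.map some ++ List.replicate m (none : Option (List (String × Int))))[j] =
      if j < sf.length then some (sf.getD j []) else none := by
  by_cases hc : j < sf.length
  · rw [List.getElem_append_left (by simpa using hc), List.getElem_map,
      List.getD_eq_getElem _ _ hc, if_pos hc]
  · rw [List.getElem_append_right (by simpa using hc), List.getElem_replicate, if_neg hc]

theorem B_eq_spine (sf : List (List (String × Int))) :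
    round_one_pairings_py_alt sf = pvSpine sf (pvP sf.length) := by
  by_cases h : (sf.length : Int) ≤ 1
  · have hP : pvP sf.length = 1 := by simp [pvP, round_count_py, h]
    have hpow : (2 : Int) ^ ((round_count_py (sf.length : Int)).toNat) = 1 := by
      simp [round_count_py, h]
    simp only [round_one_pairings_py_alt, hpow]
    rw [show PySem.Int.floordiv 1 2 = ((0 : Nat) : Int) from by decide,
      PySem.List.slice_to_natCast]
    simp [pvSpine, hP]
  · simp only [round_one_pairings_py_alt]
    set N := sf.length with hNdef
    have hN2 : 2 ≤ N := by omega
    obtain ⟨hNP, hP2N, hPeven⟩ := pv_bracket N hN2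
    set P := pvP (N : Int) with hPdef
    have hpow : (2 : Int) ^ ((round_count_py (N : Int)).toNat) = ((P : Nat) : Int) := by
      simp [hPdef, pvP]
    rw [hpow]
    have hsub : ((P : Nat) : Int) - ((N : Nat) : Int) = ((P - N : Nat) : Int) := by omega
    have hfd : PySem.Int.floordiv ((P : Nat) : Int) 2 = ((P / 2 : Nat) : Int) := by
      exact_mod_cast PySem.Int.floordiv_natCast P 2
    rw [hsub, hfd, PySem.List.slice_to_natCast, PySem.List.slice_from_natCast]
    apply List.ext_getElem
    · simp [pvSpine]
      omega
    · intro i hi hi2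
      have hiP : i < P / 2 := by
        simpa [pvSpine] using hi2
      have hiN : i < N := by omega
      simp only [List.getElem_map, List.getElem_zip, List.getElem_take, List.getElem_reverse,
        List.getElem_drop, List.length_drop, List.length_append, List.length_map,
        List.length_replicate, Int.toNat_natCast, pvSpine, List.getElem_range]
      rw [padded_getElem, padded_getElem]
      rw [if_pos hiN]
      rw [show P / 2 + (N + (P - N) - P / 2 - 1 - i) = P - 1 - i from by omega]
      simp

-- ===== VERDICT (by name: the statement is the Claim_ definition above) =====
theorem round_one_pairings_py_spec : Claim_equal_round_one_pairings_py := by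
  intro sf _
  unfold Spec_round_one_pairings_py
  rw [A_eq_spine, B_eq_spine]
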